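-- pv_equiv track=rewrite | github.com/JaeHeee/algorithm | SummerWinter Coding/SummerWinter Coding(~2018)/숫자 게임.py | solution
-- ===== SOURCE A (Python) =====
-- def solution(A, B):
--     answer = 0
--
--     if max(B) <= min (A):
--         return answer
--
--     if max(A) != min (A):
--         A.sort(reverse=True)
--         B.sort(reverse=True)
--     for a in A:
--         for b in B:
--             if a < b:
--                 B.pop(B.index(b))
--                 answer += 1
--                 break
--
--     return answer
-- ===== SOURCE B (Python) =====
-- def solution(A, B):
--     # two-pointer greedy on descending-sorted copies; does not mutate A or B
--     bs = iter(sorted(B, reverse=True))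
--     b = next(bs, None)
--     answer = 0
--     for a in sorted(A, reverse=True):
--         if b is not None and a < b:
--             answer += 1
--             b = next(bs, None)
--     return answer
-- ===== Notes on version B (the rewrite author's own statement) =====
-- stated objective: faster
-- what changed: Replaced A's nested scan with repeated B.index/B.pop (quadratic) by sorting both lists descending once and doing a single two-pointer greedy pass; B also does not mutate its arguments (A sorts and pops them in place).
import Mathlib
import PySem

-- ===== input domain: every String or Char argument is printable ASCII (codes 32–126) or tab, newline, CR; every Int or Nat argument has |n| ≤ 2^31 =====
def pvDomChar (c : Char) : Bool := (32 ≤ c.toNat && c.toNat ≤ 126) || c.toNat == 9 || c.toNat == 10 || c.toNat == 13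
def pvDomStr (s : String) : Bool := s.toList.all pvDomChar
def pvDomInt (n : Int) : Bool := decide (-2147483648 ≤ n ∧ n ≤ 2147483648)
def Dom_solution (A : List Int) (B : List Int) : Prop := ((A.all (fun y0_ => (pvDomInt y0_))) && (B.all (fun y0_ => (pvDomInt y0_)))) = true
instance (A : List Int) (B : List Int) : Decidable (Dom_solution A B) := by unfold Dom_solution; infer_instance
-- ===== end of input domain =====

-- B replaces A's quadratic nested scan by one descending two-pointer pass (A mutates its
-- arguments in place — sorts both, pops from B; B does not; equivalence is about the return value).

-- ===== PORT A =====
-- Inner 'for b in B: if a < b: B.pop(B.index(b)); break' loop: it scans B in order and stops at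
-- the FIRST b with a < b; B.index(b) is exactly that scan position (an earlier occurrence of the
-- same value would already have satisfied a < b), so the loop removes the first element b of B
-- with a < b, if any. Ported by hand, step for step (exact).
def pvInner (a : Int) : List Int → Option (List Int)
  | [] => none
  | b :: rest => if a < b then some rest else (pvInner a rest).map (b :: ·)

-- outer 'for a in A' loop, carrying the (mutated) B and answer
def pvOuter : List Int → List Int → Int → Int
  | [], _, answer => answer
  | a :: as, B, answer =>
    match pvInner a B with
    | some B' => pvOuter as B' (answer + 1)
    | none => pvOuter as B answer

def solution (A : List Int) (B : List Int) : Int :=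
  match PySem.List.max? B (fun x => x), PySem.List.min? A (fun x => x) with
  | some mB, some mA =>
    if mB ≤ mA then 0
    else
      match PySem.List.max? A (fun x => x) with
      | some MA =>
        if MA ≠ mA then
          pvOuter (PySem.List.sorted A (fun x => x) true) (PySem.List.sorted B (fun x => x) true) 0
        else
          pvOuter A B 0
      | none => 0      -- unreachable: min? A = some mA forces A ≠ []
  | _, _ => 0          -- max()/min() of an empty list raises ValueError; excluded by Pre_

-- ===== PORT B =====
-- two-pointer greedy: walk sorted(A, reverse) with the remaining suffix of sorted(B, reverse)
def pvTp : List Int → List Int → Int → Int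
  | [], _, answer => answer
  | _ :: as, [], answer => pvTp as [] answer
  | a :: as, b :: bs, answer =>
    if a < b then pvTp as bs (answer + 1) else pvTp as (b :: bs) answer

def solution_alt (A : List Int) (B : List Int) : Int :=
  pvTp (PySem.List.sorted A (fun x => x) true) (PySem.List.sorted B (fun x => x) true) 0

-- ===== PRECONDITION & SPEC =====
-- Pre_ excludes exactly the inputs where A raises: max(B) / min(A) of an empty list is a ValueError.
def Pre_solution (A : List Int) (B : List Int) : Prop := A ≠ [] ∧ B ≠ []
instance (A : List Int) (B : List Int) : Decidable (Pre_solution A B) := by unfold Pre_solution; infer_instance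
def pvWitness_solution : List Int × List Int := ([1, 3], [2, 4])

def Spec_solution (A : List Int) (B : List Int) (out : Int) : Prop := out = solution_alt A B
instance (A : List Int) (B : List Int) (out : Int) : Decidable (Spec_solution A B out) := by unfold Spec_solution; infer_instance

-- ===== CLAIM (what is proved, stated in full; the proofs are below) =====
def Claim_equal_solution : Prop := ∀ (A : List Int) (B : List Int), Dom_solution A B → Pre_solution A B → Spec_solution A B (solution A B)

-- ===== LEMMAS AND PROOFS =====

theorem pvInner_none (a : Int) (L : List Int) (h : ∀ x ∈ L, ¬ a < x) : pvInner a L = none := by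
  induction L with
  | nil => rfl
  | cons b rest ih =>
    simp only [pvInner, if_neg (h b (by simp))]
    rw [ih (fun x hx => h x (by simp [hx]))]
    rfl

-- on a descending list the inner loop only ever looks at the head
theorem pvInner_desc (a b : Int) (bs : List Int)
    (hd : (b :: bs).Pairwise (fun x y => y ≤ x)) :
    pvInner a (b :: bs) = if a < b then some bs else none := by
  by_cases hab : a < b
  · simp [pvInner, hab]
  · simp only [pvInner, if_neg hab]
    rw [pvInner_none a bs (fun x hx hax => hab (lt_of_lt_of_le hax ((List.pairwise_cons.1 hd).1 x hx)))]
    simp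

-- A's outer loop agrees with the two-pointer loop whenever B is descending
theorem pvOuter_eq_pvTp (as : List Int) : ∀ (B : List Int) (ans : Int),
    B.Pairwise (fun x y => y ≤ x) → pvOuter as B ans = pvTp as B ans := by
  induction as with
  | nil => intro B ans _; cases B <;> rfl
  | cons a as ih =>
    intro B ans hd
    cases B with
    | nil => simpa [pvOuter, pvInner, pvTp] using ih [] ans hd
    | cons b bs =>
      rw [show pvOuter (a :: as) (b :: bs) ans =
          (match pvInner a (b :: bs) with
           | some B' => pvOuter as B' (ans + 1)
           | none => pvOuter as (b :: bs) ans) from rfl,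
        pvInner_desc a b bs hd]
      by_cases hab : a < b
      · simp only [pvTp, if_pos hab]
        exact ih bs (ans + 1) (List.Pairwise.of_cons hd)
      · simp only [pvTp, if_neg hab]
        exact ih (b :: bs) ans hd

-- number of elements of B exceeding c
def pvCnt (c : Int) (B : List Int) : Nat := B.countP (fun b => decide (c < b))

theorem pvInner_none_cnt (c : Int) (B : List Int) (h : pvInner c B = none) : pvCnt c B = 0 := by
  induction B with
  | nil => rfl
  | cons b rest ih =>
    by_cases hcb : c < b
    · simp [pvInner, hcb] at h
    · simp only [pvInner, if_neg hcb] at h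
      cases hr : pvInner c rest with
      | some R => rw [hr] at h; simp at h
      | none =>
        have hstep : pvCnt c (b :: rest) = pvCnt c rest := by
          simp [pvCnt, hcb]
        rw [hstep, ih hr]

theorem pvInner_some_cnt (c : Int) (B B' : List Int) (h : pvInner c B = some B') :
    pvCnt c B = pvCnt c B' + 1 := by
  induction B generalizing B' with
  | nil => simp [pvInner] at h
  | cons b rest ih =>
    by_cases hcb : c < b
    · simp only [pvInner, if_pos hcb, Option.some.injEq] at h
      subst h; simp [pvCnt, hcb]
    · simp only [pvInner, if_neg hcb] at h
      cases hr : pvInner c rest with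
      | none => rw [hr] at h; simp at h
      | some R =>
        rw [hr] at h; simp only [Option.map_some, Option.some.injEq] at h
        subst h
        simp [pvCnt, hcb] at ih ⊢
        exact ih R hr

-- when every element of A equals c, A's loop counts min(len(A), #{b ∈ B | c < b}), in any order of B
theorem pvOuter_const (c : Int) (as : List Int) (hall : ∀ a ∈ as, a = c) :
    ∀ (B : List Int) (ans : Int), pvOuter as B ans = ans + ((min as.length (pvCnt c B) : Nat) : Int) := by
  induction as with
  | nil => intro B ans; simp [pvOuter]
  | cons a as ih =>
    intro B ans
    have hac : a = c := hall a (by simp)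
    subst hac
    have hall' : ∀ x ∈ as, x = a := fun x hx => hall x (by simp [hx])
    cases h : pvInner a B with
    | none =>
      simp only [pvOuter, h]
      rw [ih hall' B ans, pvInner_none_cnt a B h]
      simp
    | some B' =>
      simp only [pvOuter, h]
      rw [ih hall' B' (ans + 1), pvInner_some_cnt a B B' h]
      have : min (as.length + 1) (pvCnt a B' + 1) = min as.length (pvCnt a B') + 1 := by omega
      simp only [List.length_cons, this]
      push_cast; ring

-- the two-pointer loop never counts when no a exceeds the head of the (descending) B
theorem pvTp_stuck (b : Int) (as bs : List Int) (ans : Int) (h : ∀ a ∈ as, ¬ a < b) :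
    pvTp as (b :: bs) ans = ans := by
  induction as generalizing ans with
  | nil => rfl
  | cons a as ih =>
    simp only [pvTp, if_neg (h a (by simp))]
    exact ih ans (fun x hx => h x (by simp [hx]))

-- the two-pointer loop on a constant A counts the same minimum
theorem pvTp_const (c : Int) (as : List Int) (hall : ∀ a ∈ as, a = c) :
    ∀ (B : List Int) (ans : Int), B.Pairwise (fun x y => y ≤ x) →
      pvTp as B ans = ans + ((min as.length (pvCnt c B) : Nat) : Int) := by
  induction as with
  | nil => intro B ans _; simp [pvTp]
  | cons a as ih =>
    intro B ans hd
    have hac : a = c := hall a (by simp)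
    subst hac
    have hall' : ∀ x ∈ as, x = a := fun x hx => hall x (by simp [hx])
    cases B with
    | nil =>
      have : pvTp (a :: as) [] ans = pvTp as [] ans := rfl
      rw [this, ih hall' [] ans (by simp), ]
      simp [pvCnt]
    | cons b bs =>
      by_cases hab : a < b
      · simp only [pvTp, if_pos hab]
        rw [ih hall' bs (ans + 1) (List.Pairwise.of_cons hd)]
        have hcnt : pvCnt a (b :: bs) = pvCnt a bs + 1 := by
          simp [pvCnt, hab]
        rw [hcnt]
        have : min (as.length + 1) (pvCnt a bs + 1) = min as.length (pvCnt a bs) + 1 := by omega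
        simp only [List.length_cons, this]
        push_cast; ring
      · simp only [pvTp, if_neg hab]
        rw [pvTp_stuck b as bs ans (fun x hx => by rw [hall' x hx]; exact hab)]
        have hcnt : pvCnt a (b :: bs) = 0 := by
          simp only [pvCnt, List.countP_eq_zero]
          intro x hx
          rcases List.mem_cons.1 hx with rfl | hxbs
          · simpa using hab
          · have hxb : x ≤ b := (List.pairwise_cons.1 hd).1 x hxbs
            simp; omega
        simp [hcnt]

-- ===== VERDICT (by name: the statement is the Claim_ definition above) =====
theorem solution_spec : Claim_equal_solution := by
  intro A B _ hpre
  obtain ⟨hA, hB⟩ := hpre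
  unfold Spec_solution solution solution_alt
  cases hmB : PySem.List.max? B (fun x => x) with
  | none => rw [PySem.List.max?_eq_none_iff] at hmB; exact absurd hmB hB
  | some mB =>
  cases hmA : PySem.List.min? A (fun x => x) with
  | none => rw [PySem.List.min?_eq_none_iff] at hmA; exact absurd hmA hA
  | some mA =>
  simp only []
  by_cases hle : mB ≤ mA
  · -- early return 0: no sorted a is below the head of sorted B
    rw [if_pos hle]
    cases hsb : PySem.List.sorted B (fun x => x) true with
    | nil => rw [PySem.List.sorted_eq_nil_iff] at hsb; exact absurd hsb hB
    | cons b bs =>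
      rw [pvTp_stuck b _ bs 0 ?_]
      intro a ha hab
      have haA : a ∈ A := by rw [PySem.List.mem_sorted] at ha; exact ha
      have h1 : mA ≤ a := PySem.List.min?_isMin hmA a haA
      have hbB : b ∈ B := by
        have : b ∈ PySem.List.sorted B (fun x => x) true := hsb ▸ List.mem_cons_self
        rw [PySem.List.mem_sorted] at this; exact this
      have h2 : b ≤ mB := PySem.List.max?_isMax hmB b hbB
      omega
  · rw [if_neg hle]
    cases hMA : PySem.List.max? A (fun x => x) with
    | none => rw [PySem.List.max?_eq_none_iff] at hMA; exact absurd hMA hA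
    | some MA =>
    simp only []
    by_cases hne : MA ≠ mA
    · rw [if_pos hne]
      exact pvOuter_eq_pvTp _ _ 0
        (by simpa using PySem.List.sorted_pairwise_rev (xs := B) (key := fun x => x))
    · rw [if_neg hne]
      rw [not_not] at hne
      -- all elements of A equal mA
      have hall : ∀ a ∈ A, a = mA := fun a ha =>
        le_antisymm (hne ▸ PySem.List.max?_isMax hMA a ha) (PySem.List.min?_isMin hmA a ha)
      have hallS : ∀ a ∈ PySem.List.sorted A (fun x => x) true, a = mA := by
        intro a ha; rw [PySem.List.mem_sorted] at ha; exact hall a ha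
      rw [pvOuter_const mA A hall B 0,
        pvTp_const mA _ hallS _ 0
          (by simpa using PySem.List.sorted_pairwise_rev (xs := B) (key := fun x => x))]
      have hlen : (PySem.List.sorted A (fun x => x) true).length = A.length :=
        PySem.List.length_sorted _ _ _
      have hperm : (PySem.List.sorted B (fun x => x) true).Perm B := PySem.List.sorted_perm _ _ _
      have hcnt : pvCnt mA (PySem.List.sorted B (fun x => x) true) = pvCnt mA B :=
        hperm.countP_eq _
      rw [hlen, hcnt]
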